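-- pv_equiv track=rewrite | github.com/andyluo7/turboquant-amd | turboquant/kernels/attention.py | _choose_num_splits
-- ===== SOURCE A (Python) =====
-- BK_DEFAULT = 256
--
-- def _choose_num_splits(BH: int, Sk: int, BK: int = BK_DEFAULT) -> int:
--     """Heuristic: fill ~256 CUs without over-splitting."""
--     if Sk <= BK:
--         return 1
--     target_programs = max(256, BH * 4)
--     num_splits = max(1, target_programs // BH)
--     # Clamp: each split must handle at least BK tokens
--     max_splits = Sk // BK
--     num_splits = min(num_splits, max_splits)
--     # Round to power of 2 for even work distribution
--     p2 = 1
--     while p2 * 2 <= num_splits: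
--         p2 *= 2
--     return max(1, p2)
-- ===== SOURCE B (Python) =====
-- BK_DEFAULT = 256
--
-- # The clamped split count is always <= 256 (target_programs // BH <= 256 for any
-- # nonzero BH), so instead of growing a power of two bottom-up we scan a fixed
-- # descending table of the 9 possible answers and return the first one that fits.
-- _POW2_DESC = (256, 128, 64, 32, 16, 8, 4, 2, 1)
--
-- def _choose_num_splits(BH: int, Sk: int, BK: int = BK_DEFAULT) -> int:
--     """Heuristic: fill ~256 CUs without over-splitting (descending table scan)."""
--     if Sk <= BK:
--         return 1
--     num_splits = min(max(1, max(256, BH * 4) // BH), Sk // BK)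
--     for p in _POW2_DESC:
--         if p <= num_splits:
--             return p
--     return 1
-- ===== Notes on version B (the rewrite author's own statement) =====
-- stated objective: alternative
-- what changed: The bottom-up doubling while-loop is replaced by a linear scan of a fixed descending table (256,128,...,1) of all possible answers, returning the first power of two that fits; correct because the clamped split count never exceeds 256.
import Mathlib
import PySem

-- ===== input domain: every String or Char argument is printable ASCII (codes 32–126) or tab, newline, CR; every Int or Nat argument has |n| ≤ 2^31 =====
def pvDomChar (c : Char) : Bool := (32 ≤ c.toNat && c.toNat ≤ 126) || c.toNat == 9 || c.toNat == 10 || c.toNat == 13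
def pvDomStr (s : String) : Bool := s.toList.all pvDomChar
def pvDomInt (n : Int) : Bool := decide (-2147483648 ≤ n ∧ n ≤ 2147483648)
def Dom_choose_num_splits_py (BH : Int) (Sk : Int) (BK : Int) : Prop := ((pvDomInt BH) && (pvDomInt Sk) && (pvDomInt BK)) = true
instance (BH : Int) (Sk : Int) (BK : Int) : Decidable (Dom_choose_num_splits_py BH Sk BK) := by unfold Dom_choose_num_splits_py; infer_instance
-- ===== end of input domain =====

-- B replaces the bottom-up doubling loop by a scan of a fixed descending table of the 9 possible
-- answers (the clamped split count never exceeds 256); alternative decomposition, same cost.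

-- ===== PORT A =====
-- A's `while p2 * 2 <= num_splits: p2 *= 2` loop (p2 starts at 1, so 0 < p2 throughout)
def pyP2Loop (ns : Int) (p2 : Int) (h : 0 < p2) : Int :=
  if hle : p2 * 2 ≤ ns then pyP2Loop ns (p2 * 2) (by omega) else p2
  termination_by (ns - p2).toNat
  decreasing_by omega

def choose_num_splits_py (BH : Int) (Sk : Int) (BK : Int) : Int :=
  if Sk ≤ BK then 1
  else
    let target_programs := max 256 (BH * 4)
    let num_splits := max 1 (PySem.Int.floordiv target_programs BH)
    let max_splits := PySem.Int.floordiv Sk BK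
    let num_splits := min num_splits max_splits
    max 1 (pyP2Loop num_splits 1 (by norm_num))

-- ===== PORT B =====
-- B's `for p in _POW2_DESC: if p <= num_splits: return p` loop (returns 1 if nothing fits)
def scanDesc (ps : List Int) (n : Int) : Int :=
  match ps with
  | [] => 1
  | p :: rest => if p ≤ n then p else scanDesc rest n

def choose_num_splits_py_alt (BH : Int) (Sk : Int) (BK : Int) : Int :=
  if Sk ≤ BK then 1
  else
    let num_splits := min (max 1 (PySem.Int.floordiv (max 256 (BH * 4)) BH)) (PySem.Int.floordiv Sk BK)
    scanDesc [256, 128, 64, 32, 16, 8, 4, 2, 1] num_splits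

-- ===== PRECONDITION & SPEC =====
-- Pre_ excludes exactly the inputs where A raises ZeroDivisionError (B raises there too):
-- when Sk > BK, A divides by BH and by BK.
def Pre_choose_num_splits_py (BH : Int) (Sk : Int) (BK : Int) : Prop :=
  Sk ≤ BK ∨ (BH ≠ 0 ∧ BK ≠ 0)
instance (BH : Int) (Sk : Int) (BK : Int) : Decidable (Pre_choose_num_splits_py BH Sk BK) := by
  unfold Pre_choose_num_splits_py; infer_instance

def pvWitness_choose_num_splits_py : Int × Int × Int := (8, 4096, 256)

def Spec_choose_num_splits_py (BH : Int) (Sk : Int) (BK : Int) (out : Int) : Prop := out = choose_num_splits_py_alt BH Sk BK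
instance (BH : Int) (Sk : Int) (BK : Int) (out : Int) : Decidable (Spec_choose_num_splits_py BH Sk BK out) := by unfold Spec_choose_num_splits_py; infer_instance

-- ===== CLAIM (what is proved, stated in full; the proofs are below) =====
def Claim_equal_choose_num_splits_py : Prop := ∀ (BH : Int) (Sk : Int) (BK : Int), Dom_choose_num_splits_py BH Sk BK → Pre_choose_num_splits_py BH Sk BK → Spec_choose_num_splits_py BH Sk BK (choose_num_splits_py BH Sk BK)

-- ===== LEMMAS AND PROOFS =====

-- Invariant: starting the loop at a power of two ≤ ns lands on 2^(bitLength ns - 1).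
theorem pyP2Loop_pow (ns p2 : Int) (h : 0 < p2) :
    ∀ (j : Nat), p2 = (2 : Int) ^ j → p2 ≤ ns →
    pyP2Loop ns p2 h = (2 : Int) ^ (PySem.Int.bitLength ns - 1) := by
  induction p2, h using pyP2Loop.induct ns with
  | case1 p2 h hrec ih =>
    intro j hp _
    have hr : p2 * 2 <= ns := hrec
    rw [pyP2Loop, dif_pos hr]
    exact ih (j + 1) (by rw [hp]; ring) hr
  | case2 p2 h hstop =>
    intro j hp hle
    have hs : ¬ p2 * 2 <= ns := hstop
    rw [pyP2Loop, dif_neg hs, hp]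
    have hns : 0 < ns := lt_of_lt_of_le h hle
    have h1 : (2 : Int) ^ j ≤ ns := hp ▸ hle
    have h2 : ns < (2 : Int) ^ (j + 1) := by
      have hlt : ns < p2 * 2 := lt_of_not_ge hs
      calc ns < p2 * 2 := hlt
        _ = (2 : Int) ^ (j + 1) := by rw [hp]; ring
    have hA : 2 ^ j ≤ ns.natAbs := by
      zify; rw [abs_of_nonneg hns.le]; exact h1
    have hB : ns.natAbs < 2 ^ (j + 1) := by
      zify; rw [abs_of_nonneg hns.le]; exact h2
    have hbl1 : ns.natAbs < 2 ^ PySem.Int.bitLength ns := PySem.Int.lt_two_pow_bitLength ns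
    have hbl2 : 2 ^ (PySem.Int.bitLength ns - 1) ≤ ns.natAbs :=
      PySem.Int.two_pow_bitLength_le ns (ne_of_gt hns)
    have hjlt : j < PySem.Int.bitLength ns :=
      (Nat.pow_lt_pow_iff_right (by norm_num)).1 (lt_of_le_of_lt hA hbl1)
    have hble : PySem.Int.bitLength ns - 1 < j + 1 :=
      (Nat.pow_lt_pow_iff_right (by norm_num)).1 (lt_of_le_of_lt hbl2 hB)
    have hj : PySem.Int.bitLength ns - 1 = j := by omega
    rw [hj]

theorem pyP2Loop_stop (ns : Int) (hns : ns < 2) : pyP2Loop ns 1 (by norm_num) = 1 := by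
  rw [pyP2Loop, dif_neg (by omega)]

-- B's table scan picks 2^k on the interval [2^k, 2^(k+1)).
theorem scanDesc_interval (n : Int) (k : Nat) (hk : k ≤ 8)
    (hlo : (2 : Int) ^ k ≤ n) (hhi : n < 2 ^ (k + 1)) :
    scanDesc [256, 128, 64, 32, 16, 8, 4, 2, 1] n = 2 ^ k := by
  interval_cases k
  all_goals norm_num at hlo hhi
  all_goals simp only [scanDesc]
  all_goals split_ifs <;> omega

theorem scanDesc_nonpos (n : Int) (hn : n < 1) :
    scanDesc [256, 128, 64, 32, 16, 8, 4, 2, 1] n = 1 := by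
  simp only [scanDesc]
  split_ifs <;> omega

-- The clamped split count never exceeds 256 (for any nonzero BH).
theorem num_splits_le (BH : Int) (hBH : BH ≠ 0) :
    max 1 (PySem.Int.floordiv (max 256 (BH * 4)) BH) ≤ 256 := by
  rcases lt_or_gt_of_ne hBH with hneg | hpos
  · have hmx : max 256 (BH * 4) = 256 := max_eq_left (by nlinarith)
    rw [hmx]
    have hmb := PySem.Int.mod_neg_bounds (a := 256) (b := BH) hneg
    have heq := PySem.Int.floordiv_mul_add_mod 256 BH
    have hle : PySem.Int.floordiv 256 BH ≤ 0 := by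
      by_contra hpos'
      have h1 : 1 ≤ PySem.Int.floordiv 256 BH := by omega
      nlinarith [hmb.1, hmb.2]
    omega
  · have : PySem.Int.floordiv (max 256 (BH * 4)) BH < 257 := by
      rw [PySem.Int.floordiv_lt_iff_lt_mul hpos]
      exact max_lt (by nlinarith) (by nlinarith)
    omega

-- ===== VERDICT (by name: the statement is the Claim_ definition above) =====
theorem choose_num_splits_py_spec : Claim_equal_choose_num_splits_py := by
  intro BH Sk BK _ hpre
  unfold Spec_choose_num_splits_py choose_num_splits_py choose_num_splits_py_alt
  by_cases hsk : Sk ≤ BK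
  · simp [hsk]
  · simp only [if_neg hsk]
    have hBH : BH ≠ 0 := by
      rcases hpre with h | h
      · exact absurd h hsk
      · exact h.1
    set ns := min (max 1 (PySem.Int.floordiv (max 256 (BH * 4)) BH)) (PySem.Int.floordiv Sk BK) with hns
    have hub : ns ≤ 256 := le_trans (min_le_left _ _) (num_splits_le BH hBH)
    by_cases hpos : 1 ≤ ns
    · set bl := PySem.Int.bitLength ns with hbl
      have hn0 : ns ≠ 0 := by omega
      have hbl2 : 2 ^ (bl - 1) ≤ ns.natAbs := PySem.Int.two_pow_bitLength_le ns hn0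
      have hbl1 : ns.natAbs < 2 ^ bl := PySem.Int.lt_two_pow_bitLength ns
      have hblpos : 1 ≤ bl := by
        by_contra hb
        have : bl = 0 := by omega
        rw [this] at hbl1
        omega
      have habs : ns.natAbs = ns.toNat := by omega
      have hlo : (2 : Int) ^ (bl - 1) ≤ ns := by
        calc (2 : Int) ^ (bl - 1) = ((2 ^ (bl - 1) : Nat) : Int) := by push_cast; ring
          _ ≤ (ns.natAbs : Int) := by exact_mod_cast hbl2
          _ = ns := by omega
      have hhi : ns < 2 ^ ((bl - 1) + 1) := by
        rw [show (bl - 1) + 1 = bl from by omega]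
        calc ns = (ns.natAbs : Int) := by omega
          _ < ((2 ^ bl : Nat) : Int) := by exact_mod_cast hbl1
          _ = (2 : Int) ^ bl := by push_cast; ring
      have hk8 : bl - 1 ≤ 8 := by
        by_contra hgt
        have h9 : 9 ≤ bl - 1 := by omega
        have : (2 : Int) ^ 9 ≤ (2 : Int) ^ (bl - 1) :=
          pow_le_pow_right₀ (by norm_num) h9
        norm_num at this
        omega
      rw [pyP2Loop_pow ns 1 (by norm_num) 0 (by norm_num) hpos,
          scanDesc_interval ns (bl - 1) hk8 hlo hhi]
      exact max_eq_right (one_le_pow₀ (by norm_num))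
    · rw [pyP2Loop_stop ns (by omega), scanDesc_nonpos ns (by omega)]
      decide
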